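-- pv_equiv track=rewrite | github.com/MarkGjo/imperium | backend/url_shortcuts.py | pick_chrome_url_from_shortcuts
-- ===== SOURCE A (Python) =====
-- def pick_chrome_url_from_shortcuts(transcript: str, found: dict[str, str]) -> str | None:
--     """Pick the longest matching shortcut keyword’s URL present in the transcript."""
--     if not found:
--         return None
--     tl = transcript.lower()
--     for kw in sorted(found.keys(), key=len, reverse=True):
--         if kw in tl:
--             return found[kw]
--     return None
-- ===== SOURCE B (Python) =====
-- def pick_chrome_url_from_shortcuts(transcript: str, found: dict[str, str]) -> str | None:
--     """Pick the longest matching shortcut keyword's URL present in the transcript.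
--
--     Single linear max-selection pass instead of sort-then-scan; strict '>' keeps
--     the first (insertion-order) keyword on equal lengths, matching the stable sort.
--     """
--     tl = transcript.lower()
--     best_url = None
--     best_len = -1
--     for kw, url in found.items():
--         if kw in tl and len(kw) > best_len:
--             best_url = url
--             best_len = len(kw)
--     return best_url
-- ===== Notes on version B (the rewrite author's own statement) =====
-- stated objective: simpler
-- what changed: Replaced A's sort-of-all-keys-by-length-then-first-match scan with a single linear max-selection pass over found.items() keeping (best_url, best_len), using strict '>' so insertion order breaks length ties exactly like A's stable sort.
import Mathlib
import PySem

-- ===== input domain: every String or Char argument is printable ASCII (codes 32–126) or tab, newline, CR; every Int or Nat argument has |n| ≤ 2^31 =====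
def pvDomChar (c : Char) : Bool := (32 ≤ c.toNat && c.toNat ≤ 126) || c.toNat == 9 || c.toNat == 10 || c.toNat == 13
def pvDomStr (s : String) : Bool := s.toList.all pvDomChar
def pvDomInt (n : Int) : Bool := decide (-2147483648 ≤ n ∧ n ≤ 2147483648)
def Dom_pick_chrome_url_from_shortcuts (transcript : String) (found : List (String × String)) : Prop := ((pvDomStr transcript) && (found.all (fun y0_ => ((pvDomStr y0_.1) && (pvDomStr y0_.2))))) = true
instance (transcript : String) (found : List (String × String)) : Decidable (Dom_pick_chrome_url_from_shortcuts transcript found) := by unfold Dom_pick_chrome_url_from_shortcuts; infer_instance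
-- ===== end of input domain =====

-- B replaces A's sort-keys-by-length-then-first-match scan with one linear
-- max-selection pass over the items (strict '>' keeps insertion order on ties): simpler, no sort.


-- ===== PORT A =====
-- 'for kw in …: if kw in tl: return found[kw]' — found[kw] is total here (kw comes
-- from found.keys()), so the first-match loop returns 'get?' directly.
def pickLoopA (d : PySem.Dict String String) (tl : String) : List String → Option String
  | [] => none
  | kw :: rest => if PySem.Str.isIn kw tl then PySem.Dict.get? d kw else pickLoopA d tl rest

def pick_chrome_url_from_shortcuts (transcript : String) (found : List (String × String)) : Option String :=
  if found = [] then none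
  else
    let tl := PySem.Str.lower transcript
    pickLoopA (PySem.Dict.mk found) tl
      (PySem.List.sorted (PySem.Dict.keys (PySem.Dict.mk found)) (fun kw => PySem.Str.len kw) true)

-- ===== PORT B =====
def pick_chrome_url_from_shortcuts_alt (transcript : String) (found : List (String × String)) : Option String :=
  let tl := PySem.Str.lower transcript
  (((PySem.Dict.mk found).items).foldl
    (fun st p =>
      if PySem.Str.isIn p.1 tl && decide (st.2 < PySem.Str.len p.1) then (some p.2, PySem.Str.len p.1) else st)
    ((none : Option String), (-1 : Int))).1

-- ===== PRECONDITION & SPEC =====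
-- Pre_ requires found's keys to be distinct: the invariant of the Python parameter,
-- a dict, which can never hold duplicate keys — no actual call to A is excluded.
def Pre_pick_chrome_url_from_shortcuts (_transcript : String) (found : List (String × String)) : Prop :=
  (found.map Prod.fst).Nodup
instance (transcript : String) (found : List (String × String)) : Decidable (Pre_pick_chrome_url_from_shortcuts transcript found) := by unfold Pre_pick_chrome_url_from_shortcuts; infer_instance

def pvWitness_pick_chrome_url_from_shortcuts : String × (List (String × String)) :=
  ("go to Mail now", [("mail", "https://mail.example.com"), ("ma", "https://ma.example.com")])

def Spec_pick_chrome_url_from_shortcuts (transcript : String) (found : List (String × String)) (out : Option String) : Prop := out = pick_chrome_url_from_shortcuts_alt transcript found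
instance (transcript : String) (found : List (String × String)) (out : Option String) : Decidable (Spec_pick_chrome_url_from_shortcuts transcript found out) := by unfold Spec_pick_chrome_url_from_shortcuts; infer_instance

-- ===== CLAIM (what is proved, stated in full; the proofs are below) =====
def Claim_equal_pick_chrome_url_from_shortcuts : Prop := ∀ (transcript : String) (found : List (String × String)), Dom_pick_chrome_url_from_shortcuts transcript found → Pre_pick_chrome_url_from_shortcuts transcript found → Spec_pick_chrome_url_from_shortcuts transcript found (pick_chrome_url_from_shortcuts transcript found)

-- ===== LEMMAS AND PROOFS =====

-- A's first-match loop is find? followed by the dict lookup.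
theorem pickLoopA_eq_find? (d : PySem.Dict String String) (tl : String) (l : List String) :
    pickLoopA d tl l = (l.find? (fun kw => PySem.Str.isIn kw tl)).bind (fun kw => PySem.Dict.get? d kw) := by
  induction l with
  | nil => rfl
  | cons kw rest ih =>
    simp only [pickLoopA, List.find?_cons]
    cases h : PySem.Str.isIn kw tl <;> simp [ih]

-- insertBy commutes with map (descending comparison by a key of the image).
theorem insertBy_map {α β : Type} (f : α → β) (key : β → Int) (x : α) (l : List α) :
    PySem.List.insertBy (fun a b => decide (key b < key a)) (f x) (l.map f)
      = (PySem.List.insertBy (fun a b => decide (key (f b) < key (f a))) x l).map f := by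
  induction l with
  | nil => rfl
  | cons y ys ih =>
    simp only [List.map_cons, PySem.List.insertBy]
    by_cases h : key (f y) < key (f x) <;> simp [h, ih]

theorem foldl_insertBy_map {α β : Type} (f : α → β) (key : β → Int) (xs : List α) (acc : List α) :
    (xs.map f).foldl (fun acc x => PySem.List.insertBy (fun a b => decide (key b < key a)) x acc) (acc.map f)
      = (xs.foldl (fun acc x => PySem.List.insertBy (fun a b => decide (key (f b) < key (f a))) x acc) acc).map f := by
  induction xs generalizing acc with
  | nil => rfl
  | cons x xs ih => simpa [insertBy_map f key x acc] using ih _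

-- sorting the mapped list = mapping the list sorted by the composed key (stability).
theorem sorted_map_rev {α β : Type} (f : α → β) (key : β → Int) (xs : List α) :
    PySem.List.sorted (xs.map f) key true = (PySem.List.sorted xs (fun a => key (f a)) true).map f := by
  rw [PySem.List.sorted_rev_eq_foldl_insertBy, PySem.List.sorted_rev_eq_foldl_insertBy]
  simpa using foldl_insertBy_map f key xs []

-- Inserting x into a K-descending list: the first q-match changes exactly when
-- x matches and has strictly larger key than the previous first match.
theorem find?_insertBy {α : Type} (q : α → Bool) (K : α → Int) (x : α) (s : List α)
    (hs : s.Pairwise (fun a b => K b ≤ K a)) :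
    (PySem.List.insertBy (fun a b => decide (K b < K a)) x s).find? q
      = match s.find? q with
        | some p => if q x && decide (K p < K x) then some x else some p
        | none => if q x then some x else none := by
  induction s with
  | nil =>
    cases hq : q x <;> simp [PySem.List.insertBy, hq]
  | cons y ys ih =>
    have hy : ∀ p ∈ ys, K p ≤ K y := (List.pairwise_cons.1 hs).1
    have hys := (List.pairwise_cons.1 hs).2
    simp only [PySem.List.insertBy]
    by_cases hlt : K y < K x
    · simp only [hlt, decide_true, if_true]
      cases hx : q x with
      | false =>
        rw [List.find?_cons_of_neg (by simp [hx])]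
        cases hfy : List.find? q (y :: ys) <;> simp
      | true =>
        rw [List.find?_cons_of_pos hx]
        cases hfy : List.find? q (y :: ys) with
        | none => simp
        | some p =>
          have hpm := List.mem_of_find?_eq_some hfy
          have hple : K p ≤ K y := by
            rcases List.mem_cons.1 hpm with h | h
            · exact h ▸ le_refl _
            · exact hy p h
          simp [show K p < K x from lt_of_le_of_lt hple hlt]
    · simp only [hlt, decide_false, Bool.false_eq_true, if_false]
      cases hqy : q y with
      | true =>
        rw [List.find?_cons_of_pos hqy, List.find?_cons_of_pos hqy]
        simp [hlt]
      | false =>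
        rw [List.find?_cons_of_neg (by simp [hqy]), List.find?_cons_of_neg (by simp [hqy])]
        exact ih hys

-- B's fold state after xs = the first match of the K-descending stable sort of xs.
theorem foldB_char {α β : Type} (q : α → Bool) (K : α → Int) (f : α → β)
    (hK : ∀ a, 0 ≤ K a) (xs : List α) :
    xs.foldl (fun st p => if q p && decide (st.2 < K p) then (some (f p), K p) else st)
        ((none : Option β), (-1 : Int))
      = match (PySem.List.sorted xs K true).find? q with
        | some p => (some (f p), K p)
        | none => (none, -1) := by
  induction xs using List.reverseRecOn with
  | nil => rfl
  | append_singleton xs x ih =>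
    have hsorted : PySem.List.sorted (xs ++ [x]) K true
        = PySem.List.insertBy (fun a b => decide (K b < K a)) x (PySem.List.sorted xs K true) := by
      rw [PySem.List.sorted_rev_eq_foldl_insertBy, PySem.List.sorted_rev_eq_foldl_insertBy,
        List.foldl_append]
      rfl
    rw [List.foldl_append, ih, hsorted,
      find?_insertBy q K x _ (PySem.List.sorted_pairwise_rev xs K)]
    cases hf : (PySem.List.sorted xs K true).find? q with
    | none =>
      cases hq : q x with
      | true => simp [hq, show (-1 : Int) < K x from lt_of_lt_of_le (by norm_num) (hK x)]
      | false => simp [hq]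
    | some p =>
      cases hq : q x with
      | false => simp [hq]
      | true =>
        by_cases hlen : K p < K x
        · simp [hq, hlen]
        · simp [hq, hlen]

-- ===== VERDICT (by name: the statement is the Claim_ definition above) =====
theorem pick_chrome_url_from_shortcuts_spec : Claim_equal_pick_chrome_url_from_shortcuts := by
  intro transcript found _hdom hpre
  unfold Spec_pick_chrome_url_from_shortcuts
  unfold Pre_pick_chrome_url_from_shortcuts at hpre
  simp only [pick_chrome_url_from_shortcuts, pick_chrome_url_from_shortcuts_alt]
  have hkeys : (PySem.Dict.mk found).keys = found.map Prod.fst := rfl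
  rw [foldB_char (fun p : String × String => PySem.Str.isIn p.1 (PySem.Str.lower transcript))
      (fun p : String × String => PySem.Str.len p.1) Prod.snd
      (fun a => by simp [PySem.Str.len]) found]
  by_cases hnil : found = []
  · subst hnil; rfl
  · simp only [hnil, if_false]
    rw [pickLoopA_eq_find?, hkeys, sorted_map_rev Prod.fst PySem.Str.len found, List.find?_map]
    cases hf : (PySem.List.sorted found (fun a : String × String => PySem.Str.len a.1) true).find?
        (fun p : String × String => PySem.Str.isIn p.1 (PySem.Str.lower transcript)) with
    | none =>
      have h2 : (PySem.List.sorted found (fun a : String × String => PySem.Str.len a.1) true).find?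
          ((fun kw => PySem.Str.isIn kw (PySem.Str.lower transcript)) ∘ Prod.fst) = none := hf
      rw [h2]
      simp
    | some p =>
      have hmem : p ∈ found :=
        (PySem.List.mem_sorted found _ true p).1 (List.mem_of_find?_eq_some hf)
      have h2 : (PySem.List.sorted found (fun a : String × String => PySem.Str.len a.1) true).find?
          ((fun kw => PySem.Str.isIn kw (PySem.Str.lower transcript)) ∘ Prod.fst) = some p := hf
      have hget : PySem.Dict.get? (PySem.Dict.mk found) p.1 = some p.2 :=
        PySem.Dict.get?_of_mem_items (PySem.Dict.mk found) (k := p.1) (v := p.2) hmem hpre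
      rw [h2]
      simp [hget]
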